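-- pv_equiv track=rewrite | github.com/Luke100000/ImmersiveAPI | common/rag/html_processor.py | get_chapters
-- ===== SOURCE A (Python) =====
-- from dataclasses import dataclass
-- from typing import Optional
--
-- @dataclass
-- class Node:
--     title: str
--     level: int
--     content: str
--     children: list["Node"]
--     parent: Optional["Node"]
--
-- DEFAULT_BLACKLIST = {
--     "Contents",
--     "Data values",
--     "Issues",
--     "Gallery",
--     "References",
--     "Navigation",
--     "Navigation menu",
-- }
--
-- def _traverse(node: Node, blacklist: set[str], result: list[str] = None):
--     if result is None:
--         result = []
--
--     if node.title not in blacklist: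
--         result.append("#" * node.level + " " + node.title + "\n" + node.content)
--
--         for child in node.children:
--             _traverse(child, blacklist, result)
--
--     return result
--
-- def get_chapters(md: str) -> list[str]:
--     current = Node("", 0, "", [], None)
--     root = current
--
--     for line in md.split("\n"):
--         if line.startswith("#"):
--             level = len(line) - len(line.lstrip("#"))
--
--             for i in range(current.level - level + 1):
--                 current = current.parent
--
--             if current is None:
--                 current = root
--
--             current.children.append(
--                 Node(line.lstrip("#").strip(), level, "", [], current)
--             )
--             current = current.children[-1]
--         else:
--             current.content += line + "\n"
--
--     return _traverse(
--         root,
--         DEFAULT_BLACKLIST,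
--     )
-- ===== SOURCE B (Python) =====
-- DEFAULT_BLACKLIST = {
--     "Contents",
--     "Data values",
--     "Issues",
--     "Gallery",
--     "References",
--     "Navigation",
--     "Navigation menu",
-- }
--
-- def get_chapters(md: str) -> list[str]:
--     # One pass, no tree: an explicit stack of (level, clean) frames replaces
--     # the parent-pointer navigation, and chapters are emitted in document order
--     # the moment their content block ends.
--     result = []
--     stack = [(0, True)]          # ancestor chain incl. current: (level, clean)
--     hdr, content = " ", ""       # header line and content of the current chapter
--     for line in md.split("\n"):
--         if line.startswith("#"):
--             if stack[-1][1]: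
--                 result.append(hdr + "\n" + content)
--             level = 0
--             while level < len(line) and line[level] == "#":
--                 level += 1
--             title = line[level:].strip()
--             pops = stack[-1][0] - level + 1
--             if pops >= len(stack):
--                 stack = [(0, True)]
--             elif pops > 0:
--                 del stack[-pops:]
--             stack.append((level, stack[-1][1] and title not in DEFAULT_BLACKLIST))
--             hdr = "#" * level + " " + title
--             content = ""
--         else:
--             content += line + "\n"
--     if stack[-1][1]:
--         result.append(hdr + "\n" + content)
--     return result
-- ===== Notes on version B (the rewrite author's own statement) =====
-- stated objective: simpler
-- what changed: A builds a parent-pointer tree of Node objects and then recursively traverses it with blacklist pruning; B makes a single pass with an explicit (level, clean) stack, emitting each chapter string in document order the moment its content block ends, with the blacklist handled by an inherited clean flag.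
import Mathlib
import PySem

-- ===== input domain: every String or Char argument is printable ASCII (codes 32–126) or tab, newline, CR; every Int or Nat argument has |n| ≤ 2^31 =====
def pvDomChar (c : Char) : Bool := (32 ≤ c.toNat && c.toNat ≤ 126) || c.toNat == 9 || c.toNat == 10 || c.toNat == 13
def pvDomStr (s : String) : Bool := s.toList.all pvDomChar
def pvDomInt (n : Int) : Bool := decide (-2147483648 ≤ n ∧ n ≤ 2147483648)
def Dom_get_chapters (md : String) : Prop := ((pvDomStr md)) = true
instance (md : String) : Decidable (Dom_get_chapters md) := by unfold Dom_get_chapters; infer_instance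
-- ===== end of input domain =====

-- B replaces A's parent-pointer tree + recursive traversal by a single pass with an
-- explicit (level, clean) stack that emits each chapter when its content block ends
-- (objective: simpler).  Equality of the RETURN value is what is proved.

-- ===== PORT A =====
-- A's Node has mutable children and a parent pointer; the current node with its
-- ancestor chain is ported as a zipper: a list of frames, top (= current) first,
-- bottom = root.  'current = current.parent' closes the top frame into its parent
-- (the Python append at push time aliases the same object, so closing at pop time
-- builds the identical tree).  'current is None' followed by the reset to root is
-- modeled by stopping at the root frame — the same state wherever A returns.
def pvBL : List String :=
  ["Contents", "Data values", "Issues", "Gallery", "References", "Navigation", "Navigation menu"]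

mutual
inductive PvNode where
  | mk : String → Int → String → PvNodeL → PvNode
inductive PvNodeL where
  | nil
  | cons : PvNode → PvNodeL → PvNodeL
end

structure PvFrame where
  title : String
  level : Int
  content : String
  children : PvNodeL

-- "#" * level (empty for level ≤ 0, exactly Python's str * int)
def pvHashes (l : Int) : String := String.ofList (List.replicate l.toNat '#')

def pvAppendL : PvNodeL → PvNode → PvNodeL
  | .nil, n => .cons n .nil
  | .cons m rest, n => .cons m (pvAppendL rest n)

def pvNodeOf (f : PvFrame) : PvNode := .mk f.title f.level f.content f.children

def pvClose (f p : PvFrame) : PvFrame :=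
  ⟨p.title, p.level, p.content, pvAppendL p.children (pvNodeOf f)⟩

-- 'for i in range(k): current = current.parent' on the zipper (stops at root, see above)
def pvPopN : Nat → List PvFrame → List PvFrame
  | 0, ch => ch
  | n + 1, f :: p :: rest => pvPopN n (pvClose f p :: rest)
  | _ + 1, ch => ch

def pvCollapse : List PvFrame → PvFrame
  | [] => ⟨"", 0, "", .nil⟩
  | [f] => f
  | f :: p :: rest => pvCollapse (pvClose f p :: rest)
termination_by l => l.length
decreasing_by simp

-- _traverse(node, blacklist, result)
mutual
def pvTrav : PvNode → List String → List String
  | .mk t l c ch, res =>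
      if pvBL.contains t then res
      else pvTravL ch (res ++ [(((pvHashes l ++ " ") ++ t) ++ "\n") ++ c])
def pvTravL : PvNodeL → List String → List String
  | .nil, res => res
  | .cons n rest, res => pvTravL rest (pvTrav n res)
end

-- the body of A's 'for line in md.split("\n")'
def pvStepA (chain : List PvFrame) (line : List Char) : List PvFrame :=
  if PySem.Chars.startswith line ['#'] then
    -- line.lstrip("#") for the single strip character '#' is dropWhile (exact)
    let stripped := line.dropWhile (· == '#')
    let level : Int := (line.length : Int) - (stripped.length : Int)
    let title : String := String.ofList (PySem.Chars.strip stripped)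
    let k : Int := (match chain with | f :: _ => f.level | [] => 0) - level + 1
    ⟨title, level, "", .nil⟩ :: pvPopN k.toNat chain
  else
    match chain with
    | f :: rest => { f with content := f.content ++ (String.ofList line ++ "\n") } :: rest
    | [] => []

def get_chapters (md : String) : List String :=
  let chain := (PySem.Chars.splitOn md.toList ['\n']).foldl pvStepA [⟨"", 0, "", .nil⟩]
  pvTrav (pvNodeOf (pvCollapse chain)) []

-- ===== PORT B =====
-- 'while level < len(line) and line[level] == "#": level += 1'
def pvCountH : List Char → Nat
  | [] => 0
  | c :: rest => if c == '#' then pvCountH rest + 1 else 0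

-- state: (stack of (level, clean), result, hdr, content)
def pvStepB (st : List (Int × Bool) × List String × String × String) (line : List Char) :
    List (Int × Bool) × List String × String × String :=
  let (stack, result, hdr, content) := st
  if PySem.Chars.startswith line ['#'] then
    let result := if (match stack with | (_, c) :: _ => c | [] => true)
                  then result ++ [(hdr ++ "\n") ++ content] else result
    let levN := pvCountH line
    let level : Int := (levN : Int)
    let title : String := String.ofList (PySem.Chars.strip (line.drop levN))
    let pops : Int := (match stack with | (l, _) :: _ => l | [] => 0) - level + 1
    let stack := if (stack.length : Int) ≤ pops then [(0, true)]
                 else if 0 < pops then stack.drop pops.toNat else stack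
    let clean := (match stack with | (_, c) :: _ => c | [] => true) && !(pvBL.contains title)
    ((level, clean) :: stack, result, (pvHashes level ++ " ") ++ title, "")
  else
    (stack, result, hdr, content ++ (String.ofList line ++ "\n"))

def get_chapters_alt (md : String) : List String :=
  match (PySem.Chars.splitOn md.toList ['\n']).foldl pvStepB ([(0, true)], [], " ", "") with
  | (stack, result, hdr, content) =>
      result ++ (if (match stack with | (_, c) :: _ => c | [] => true)
                 then [(hdr ++ "\n") ++ content] else [])

-- ===== PRECONDITION & SPEC =====
-- the heading levels of md, in order
def pvHeadLevels (md : String) : List Int :=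
  (PySem.Chars.splitOn md.toList ['\n']).filterMap fun line =>
    if PySem.Chars.startswith line ['#'] then
      some ((line.length : Int) - ((line.dropWhile (· == '#')).length : Int))
    else none

-- scalar recurrence over the heading levels: prevL = level of the previous heading,
-- e = its level minus its depth in the tree; A pops past the root's parent (and
-- raises AttributeError) exactly when e ≥ L + 1 at some heading of level L
def pvPreRun : Int → Int → List Int → Bool
  | _, _, [] => true
  | prevL, e, L :: rest =>
      if prevL < L then pvPreRun L (e + L - prevL - 1) rest
      else if L + 1 ≤ e then false
      else if e = L then pvPreRun L (L - 1) rest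
      else pvPreRun L e rest

-- Pre_ excludes exactly the inputs on which A raises AttributeError (navigating to the
-- parent of None when a heading's level drops by more than the current depth allows)
def Pre_get_chapters (md : String) : Prop := pvPreRun 0 0 (pvHeadLevels md) = true
instance (md : String) : Decidable (Pre_get_chapters md) := by unfold Pre_get_chapters; infer_instance

def pvWitness_get_chapters : String := "intro\n# Top\ntext\n## Gallery\npic\n## ok\nz"

def Spec_get_chapters (md : String) (out : List String) : Prop := out = get_chapters_alt md
instance (md : String) (out : List String) : Decidable (Spec_get_chapters md out) := by unfold Spec_get_chapters; infer_instance

-- ===== CLAIM (what is proved, stated in full; the proofs are below) =====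
def Claim_equal_get_chapters : Prop := ∀ (md : String), Dom_get_chapters md → Pre_get_chapters md → Spec_get_chapters md (get_chapters md)

-- ===== LEMMAS AND PROOFS =====

def pvCleanF (f : PvFrame) : Bool := !(pvBL.contains f.title)
def pvKey (f : PvFrame) : String × Int := (f.title, f.level)
def pvNodeStr (f : PvFrame) : String := (((pvHashes f.level ++ " ") ++ f.title) ++ "\n") ++ f.content

mutual
def pvFlat : PvNode → List String
  | .mk t l c ch =>
      if pvBL.contains t then []
      else ((((pvHashes l ++ " ") ++ t) ++ "\n") ++ c) :: pvFlatL ch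
def pvFlatL : PvNodeL → List String
  | .nil => []
  | .cons n rest => pvFlat n ++ pvFlatL rest
end

-- flattening of a chain, ROOT-FIRST
def pvG : List PvFrame → List String
  | [] => []
  | f :: rest =>
      if pvBL.contains f.title then []
      else pvNodeStr f :: (pvFlatL f.children ++ pvG rest)

def pvAllC (l : List PvFrame) : Bool := l.all pvCleanF

-- the stack B keeps, computed from the (title, level) keys of the chain (top-first)
def pvMS : List (String × Int) → List (Int × Bool)
  | [] => []
  | (t, l) :: rest =>
      (l, !(pvBL.contains t) && rest.all (fun k => !(pvBL.contains k.1))) :: pvMS rest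

def pvInv (chain : List PvFrame) (st : List (Int × Bool) × List String × String × String) : Prop :=
  ∃ f rest, chain = f :: rest ∧
    st.1 = pvMS (chain.map pvKey) ∧
    st.2.1 = pvG rest.reverse ∧
    st.2.2.1 = (pvHashes f.level ++ " ") ++ f.title ∧
    st.2.2.2 = f.content ∧
    f.children = .nil ∧
    (chain.map pvKey).getLast? = some ("", 0)

mutual
theorem pvTrav_flat (n : PvNode) (res : List String) : pvTrav n res = res ++ pvFlat n := by
  cases n with
  | mk t l c ch =>
    by_cases h : t ∈ pvBL
    · simp [pvTrav, pvFlat, h]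
    · simp [pvTrav, pvFlat, h, pvTravL_flat ch]
theorem pvTravL_flat (l : PvNodeL) (res : List String) : pvTravL l res = res ++ pvFlatL l := by
  cases l with
  | nil => simp [pvTravL, pvFlatL]
  | cons n rest => simp [pvTravL, pvFlatL, pvTrav_flat n res, pvTravL_flat rest]
end

theorem pvFlatL_append : (ch : PvNodeL) → (n : PvNode) →
    pvFlatL (pvAppendL ch n) = pvFlatL ch ++ pvFlat n
  | .nil, n => by simp [pvAppendL, pvFlatL]
  | .cons m rest, n => by simp [pvAppendL, pvFlatL, pvFlatL_append rest n]

theorem pvG_append (xs : List PvFrame) (f : PvFrame) :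
    pvG (xs ++ [f]) = pvG xs ++
      (if pvAllC xs && pvCleanF f then pvNodeStr f :: pvFlatL f.children else []) := by
  induction xs with
  | nil => by_cases h : f.title ∈ pvBL <;> simp [pvG, pvAllC, pvCleanF, h]
  | cons x rest ih =>
    by_cases hx : x.title ∈ pvBL
    · simp [pvG, pvAllC, pvCleanF, hx]
    · simp [pvG, pvAllC, pvCleanF, hx, ih]

theorem pvFlat_nodeOf (f : PvFrame) :
    pvFlat (pvNodeOf f) = if pvCleanF f then pvNodeStr f :: pvFlatL f.children else [] := by
  obtain ⟨t, l, c, ch⟩ := f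
  by_cases h : t ∈ pvBL <;> simp [pvNodeOf, pvFlat, pvCleanF, pvNodeStr, h]

theorem pvG_close (f p : PvFrame) (rest : List PvFrame) :
    pvG ((pvClose f p :: rest).reverse) = pvG ((f :: p :: rest).reverse) := by
  rw [show (pvClose f p :: rest).reverse = rest.reverse ++ [pvClose f p] by simp,
      show (f :: p :: rest).reverse = (rest.reverse ++ [p]) ++ [f] by simp,
      pvG_append, pvG_append, pvG_append]
  have hclean : pvCleanF (pvClose f p) = pvCleanF p := by simp [pvCleanF, pvClose]
  have hstr : pvNodeStr (pvClose f p) = pvNodeStr p := by simp [pvNodeStr, pvClose]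
  have hch : (pvClose f p).children = pvAppendL p.children (pvNodeOf f) := rfl
  have hall : pvAllC (rest.reverse ++ [p]) = (pvAllC rest.reverse && pvCleanF p) := by
    simp [pvAllC, pvCleanF]
  rw [hclean, hstr, hch, hall, pvFlatL_append, pvFlat_nodeOf]
  cases hA : pvAllC rest.reverse <;> cases hP : pvCleanF p <;> cases hF : pvCleanF f <;>
    simp [hA, hP, hF]

theorem pvG_popN : (n : Nat) → (ch : List PvFrame) →
    pvG ((pvPopN n ch).reverse) = pvG (ch.reverse)
  | 0, ch => rfl
  | n + 1, f :: p :: rest => by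
      rw [pvPopN, pvG_popN n (pvClose f p :: rest), pvG_close f p rest]
  | _ + 1, [] => rfl
  | _ + 1, [f] => rfl

theorem pvG_collapse : (ch : List PvFrame) → ch ≠ [] →
    pvFlat (pvNodeOf (pvCollapse ch)) = pvG ch.reverse
  | [f], _ => by
      by_cases h : pvCleanF f <;>
        simp_all [pvCollapse, pvFlat_nodeOf, pvG, pvCleanF, pvNodeStr, pvFlatL]
  | f :: p :: rest, _ => by
      rw [pvCollapse, pvG_collapse (pvClose f p :: rest) (by simp), pvG_close f p rest]
termination_by ch _ => ch.length
decreasing_by simp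

theorem pvCountH_eq (cs : List Char) :
    (pvCountH cs : Int) = (cs.length : Int) - ((cs.dropWhile (· == '#')).length : Int) := by
  induction cs with
  | nil => simp [pvCountH]
  | cons c rest ih =>
    by_cases h : c = '#'
    · simp [pvCountH, h, List.dropWhile_cons, ih]; omega
    · have hb : (c == '#') = false := by simpa using h
      simp [pvCountH, hb, List.dropWhile_cons]

theorem pvCountH_drop (cs : List Char) :
    cs.drop (pvCountH cs) = cs.dropWhile (· == '#') := by
  induction cs with
  | nil => simp [pvCountH]
  | cons c rest ih =>
    by_cases h : c = '#'
    · simp [pvCountH, h, List.dropWhile_cons, ih]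
    · have hb : (c == '#') = false := by simpa using h
      simp [pvCountH, hb, List.dropWhile_cons]

theorem pvPopN_map_key : (n : Nat) → (f : PvFrame) → (rest : List PvFrame) →
    (pvPopN n (f :: rest)).map pvKey = ((f :: rest).map pvKey).drop (min n rest.length)
  | 0, f, rest => by simp [pvPopN]
  | n + 1, f, [] => by simp [pvPopN]
  | n + 1, f, p :: rs => by
      rw [pvPopN, pvPopN_map_key n (pvClose f p) rs]
      simp [pvKey, pvClose, Nat.succ_min_succ]

theorem pvMS_drop (n : Nat) (l : List (String × Int)) :
    pvMS (l.drop n) = (pvMS l).drop n := by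
  induction l generalizing n with
  | nil => simp [pvMS]
  | cons k rest ih =>
    cases n with
    | zero => simp
    | succ m => obtain ⟨t, lev⟩ := k; simp [pvMS, ih]

theorem pvMS_length (l : List (String × Int)) : (pvMS l).length = l.length := by
  induction l with
  | nil => rfl
  | cons k rest ih => obtain ⟨t, lev⟩ := k; simp [pvMS, ih]

theorem pvDrop_getLast? {α : Type} (l : List α) (n : Nat) (h : n < l.length) :
    (l.drop n).getLast? = l.getLast? := by
  induction l generalizing n with
  | nil => simp at h
  | cons x rest ih =>
    cases n with
    | zero => simp
    | succ m =>
      simp only [List.length_cons, Nat.succ_lt_succ_iff] at h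
      rw [List.drop_succ_cons, ih m h]
      cases rest with
      | nil => simp at h
      | cons y ys => simp [List.getLast?_cons]

theorem pvDrop_last {α : Type} (l : List α) (x : α) (h : l.getLast? = some x) :
    l.drop (l.length - 1) = [x] := by
  induction l with
  | nil => simp at h
  | cons y ys ih =>
    cases ys with
    | nil => simp_all
    | cons z zs =>
      rw [List.getLast?_cons_cons] at h
      simpa using ih h

theorem pvMS_cons (k : String × Int) (l : List (String × Int)) :
    pvMS (k :: l) = (k.2, !(pvBL.contains k.1) && l.all (fun q => !(pvBL.contains q.1))) :: pvMS l := rfl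

-- the emission step: pvG of a chain whose top has no children
theorem pvInv_emit (f : PvFrame) (rest : List PvFrame) (hnil : f.children = .nil) :
    pvG ((f :: rest).reverse) = pvG rest.reverse ++
      (if !(pvBL.contains f.title) && (rest.map pvKey).all (fun q => !(pvBL.contains q.1))
       then [pvNodeStr f] else []) := by
  rw [show (f :: rest).reverse = rest.reverse ++ [f] by simp, pvG_append]
  have hc : (pvAllC rest.reverse && pvCleanF f) =
      (!(pvBL.contains f.title) && (rest.map pvKey).all (fun q => !(pvBL.contains q.1))) := by
    rw [show (rest.map pvKey).all (fun q => !(pvBL.contains q.1)) = rest.all pvCleanF from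
          by rw [List.all_map]; rfl,
        pvAllC, List.all_reverse, Bool.and_comm]
    rfl
  rw [hc, hnil]
  cases (!(pvBL.contains f.title) && (rest.map pvKey).all (fun q => !(pvBL.contains q.1))) <;>
    simp [pvFlatL]

theorem pvStep_inv (chain : List PvFrame) (st : List (Int × Bool) × List String × String × String)
    (line : List Char) (h : pvInv chain st) : pvInv (pvStepA chain line) (pvStepB st line) := by
  obtain ⟨stack, result, hdr, content⟩ := st
  obtain ⟨f, rest, hch, h1, h2, h3, h4, h5, h6⟩ := h
  simp only at h1 h2 h3 h4 h5 h6
  subst hch; subst h1; subst h2; subst h3; subst h4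
  by_cases hl : PySem.Chars.startswith line ['#']
  · -- heading line
    set lvA : Int := (line.length : Int) - ((line.dropWhile (· == '#')).length : Int) with hlvA
    set ttl : String := String.ofList (PySem.Chars.strip (line.dropWhile (· == '#'))) with httl
    set k : Int := f.level - lvA + 1 with hk
    set popped : List PvFrame := pvPopN k.toNat (f :: rest) with hpop
    set l : List (String × Int) := (f :: rest).map pvKey with hls
    set cf : Bool := !(pvBL.contains f.title) &&
      (rest.map pvKey).all (fun q => !(pvBL.contains q.1)) with hcf
    have hcnt : ((pvCountH line : Nat) : Int) = lvA := pvCountH_eq line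
    have ha : pvStepA (f :: rest) line = (⟨ttl, lvA, "", .nil⟩ : PvFrame) :: popped := by
      simp [pvStepA, hl, hpop, hk, hlvA, httl]
    have hb : pvStepB (pvMS l, pvG rest.reverse,
          (pvHashes f.level ++ " ") ++ f.title, f.content) line =
        ((lvA, (match (if ((pvMS l).length : Int) ≤ k then [((0 : Int), true)]
                       else if 0 < k then (pvMS l).drop k.toNat else pvMS l) with
                | (_, c) :: _ => c | [] => true) && !(pvBL.contains ttl)) ::
           (if ((pvMS l).length : Int) ≤ k then [((0 : Int), true)]
            else if 0 < k then (pvMS l).drop k.toNat else pvMS l),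
         (if cf then pvG rest.reverse ++
            [(((pvHashes f.level ++ " ") ++ f.title) ++ "\n") ++ f.content] else pvG rest.reverse),
         (pvHashes lvA ++ " ") ++ ttl, "") := by
      simp only [pvStepB, hl, if_pos, pvCountH_drop, hcnt, hls, List.map_cons, pvMS_cons, pvKey]
      rfl
    rw [ha, hb]
    have hlen : (pvMS l).length = rest.length + 1 := by
      rw [pvMS_length, hls]; simp
    have hmap : popped.map pvKey = l.drop (min k.toNat rest.length) := by
      rw [hpop, hls]; exact pvPopN_map_key k.toNat f rest
    have hstack1 : (if ((pvMS l).length : Int) ≤ k then [((0 : Int), true)]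
        else if 0 < k then (pvMS l).drop k.toNat else pvMS l) = pvMS (popped.map pvKey) := by
      rw [hmap]
      by_cases hk0 : k ≤ 0
      · have h0 : k.toNat = 0 := Int.toNat_of_nonpos hk0
        rw [if_neg (by omega), if_neg (by omega), h0]
        simp only [Nat.zero_min, List.drop_zero]
      · by_cases hk1 : ((pvMS l).length : Int) ≤ k
        · rw [if_pos hk1]
          have hm : min k.toNat rest.length = rest.length := by omega
          have hl2 : l.drop rest.length = [("", 0)] := by
            have hx := pvDrop_last l ("", 0) h6
            rw [show l.length - 1 = rest.length from by rw [hls]; simp] at hx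
            exact hx
          rw [hm, hl2]
          decide
        · rw [if_neg hk1, if_pos (by omega)]
          have hm : min k.toNat rest.length = k.toNat := by omega
          rw [hm, pvMS_drop]
    have hne : popped ≠ [] := by
      intro hc
      rw [hc] at hmap
      have : l.length ≤ min k.toNat rest.length := by
        simpa [List.drop_eq_nil_iff] using hmap.symm
      rw [hls] at this
      simp only [List.length_cons, List.length_map] at this
      omega
    rw [hstack1]
    refine ⟨⟨ttl, lvA, "", .nil⟩, popped, rfl, ?_, ?_, rfl, rfl, rfl, ?_⟩
    · -- stack component
      rcases hq : popped with _ | ⟨q, qs⟩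
      · exact absurd hq hne
      · simp only [List.map_cons, pvMS_cons, pvKey]
        congr 1
        simp [Bool.and_comm, Bool.and_left_comm, Bool.and_assoc]
    · -- result component
      rw [hpop, pvG_popN, pvInv_emit f rest h5, ← hcf]
      cases cf <;> simp [pvNodeStr]
    · -- getLast?
      rcases hq : popped with _ | ⟨q, qs⟩
      · exact absurd hq hne
      · have hmap' : (q :: qs).map pvKey = l.drop (min k.toNat rest.length) := hq ▸ hmap
        rw [List.map_cons, List.map_cons, List.getLast?_cons_cons, ← List.map_cons, hmap',
            pvDrop_getLast? _ _ (by rw [hls]; simp only [List.length_cons, List.length_map]; omega), h6]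
  · -- content line
    have ha : pvStepA (f :: rest) line =
        ({ f with content := f.content ++ (String.ofList line ++ "\n") }) :: rest := by
      simp [pvStepA, hl]
    have hb : pvStepB (pvMS ((f :: rest).map pvKey), pvG rest.reverse,
          (pvHashes f.level ++ " ") ++ f.title, f.content) line =
        (pvMS ((f :: rest).map pvKey), pvG rest.reverse,
          (pvHashes f.level ++ " ") ++ f.title, f.content ++ (String.ofList line ++ "\n")) := by
      simp [pvStepB, hl]
    rw [ha, hb]
    exact ⟨_, rest, rfl, by simp [pvKey], rfl, by simp, by simp, by simpa using h5,
      by simpa [pvKey] using h6⟩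

theorem pvFold_inv (lines : List (List Char)) (chain : List PvFrame)
    (st : List (Int × Bool) × List String × String × String) (h : pvInv chain st) :
    pvInv (lines.foldl pvStepA chain) (lines.foldl pvStepB st) := by
  induction lines generalizing chain st with
  | nil => exact h
  | cons l ls ih => exact ih _ _ (pvStep_inv chain st l h)

theorem pvInv_final (chain : List PvFrame)
    (st : List (Int × Bool) × List String × String × String) (h : pvInv chain st) :
    pvTrav (pvNodeOf (pvCollapse chain)) [] =
      st.2.1 ++ (if (match st.1 with | (_, c) :: _ => c | [] => true)
                 then [(st.2.2.1 ++ "\n") ++ st.2.2.2] else []) := by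
  obtain ⟨stack, result, hdr, content⟩ := st
  obtain ⟨f, rest, hch, h1, h2, h3, h4, h5, h6⟩ := h
  simp only at h1 h2 h3 h4 h5 h6
  subst hch; subst h1; subst h2; subst h3; subst h4
  show pvTrav (pvNodeOf (pvCollapse (f :: rest))) [] =
    pvG rest.reverse ++
      (if (!(pvBL.contains f.title) && (rest.map pvKey).all (fun q => !(pvBL.contains q.1)))
       then [((((pvHashes f.level ++ " ") ++ f.title) ++ "\n") ++ f.content)] else [])
  rw [pvTrav_flat, pvG_collapse _ (by simp), pvInv_emit f rest h5]
  simp [pvNodeStr]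

theorem pvMain (md : String) : get_chapters md = get_chapters_alt md := by
  have h0 : pvInv [(⟨"", 0, "", .nil⟩ : PvFrame)] ([((0 : Int), true)], [], " ", "") := by
    refine ⟨⟨"", 0, "", .nil⟩, [], rfl, by decide, rfl, by decide, rfl, rfl, by decide⟩
  have h := pvInv_final _ _ (pvFold_inv (PySem.Chars.splitOn md.toList ['
']) _ _ h0)
  unfold get_chapters get_chapters_alt
  rcases hst : (PySem.Chars.splitOn md.toList ['
']).foldl pvStepB ([((0 : Int), true)], [], " ", "")
    with ⟨stack, result, hdr, content⟩
  rw [hst] at h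
  simpa using h

-- ===== VERDICT (by name: the statement is the Claim_ definition above) =====
theorem get_chapters_spec : Claim_equal_get_chapters := by
  intro md _ _
  unfold Spec_get_chapters
  exact pvMain md
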